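-- pv_equiv track=rewrite | github.com/oguzhankirimli/visualstudio | primesummations.py | find_first_value_with_over_n_ways
-- ===== SOURCE A (Python) =====
-- def prime_numbers_up_to(n):
--
--     sieve = [True] * (n + 1)
--     sieve[0] = sieve[1] = False
--     for i in range(2, int(n**0.5) + 1):
--         if sieve[i]:
--             for j in range(i*i, n + 1, i):
--                 sieve[j] = False
--     return [x for x in range(2, n + 1) if sieve[x]]
--
-- def count_prime_sum_ways(limit):
--     primes = prime_numbers_up_to(limit)
--     ways = [0] * (limit + 1)
--     ways[0] = 1
--
--
--     for prime in primes:
--         for i in range(prime, limit + 1):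
--             ways[i] += ways[i - prime]
--
--     return ways
--
-- def find_first_value_with_over_n_ways(n):
--     limit = 10
--     while True:
--         ways = count_prime_sum_ways(limit)
--         for i in range(limit):
--             if ways[i] > n:
--                 return i
--         limit *= 2
-- ===== SOURCE B (Python) =====
-- def prime_numbers_up_to(n):
--     # same sieve helper as the original module
--     sieve = [True] * (n + 1)
--     sieve[0] = sieve[1] = False
--     for i in range(2, int(n**0.5) + 1):
--         if sieve[i]:
--             for j in range(i*i, n + 1, i):
--                 sieve[j] = False
--     return [x for x in range(2, n + 1) if sieve[x]]
--
-- def find_first_value_with_over_n_ways(n):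
--     limit = 10
--     while True:
--         primes = prime_numbers_up_to(limit)
--         m = len(primes)
--         # memo[j][t] = number of multisets of primes[:j] summing to t (None = not yet computed)
--         memo = [[None] * (limit + 1) for _ in range(m + 1)]
--
--         def count(t, j):
--             if t < 0:
--                 return 0
--             if j == 0:
--                 return 1 if t == 0 else 0
--             c = memo[j][t]
--             if c is None:
--                 c = count(t, j - 1) + count(t - primes[j - 1], j)
--                 memo[j][t] = c
--             return c
--
--         for i in range(limit):
--             if count(i, m) > n:
--                 return i
--         limit *= 2
-- ===== Notes on version B (the rewrite author's own statement) =====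
-- stated objective: alternative
-- what changed: The bottom-up in-place coin-change DP array (for each prime, a forward sweep mutating ways[]) is replaced by a top-down memoized recursion count(t, j) = count(t, j-1) + count(t - primes[j-1], j) over (target, prime-prefix length) with a 2D memo table; the sieve and the doubling-limit outer search are kept.
import Mathlib
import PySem

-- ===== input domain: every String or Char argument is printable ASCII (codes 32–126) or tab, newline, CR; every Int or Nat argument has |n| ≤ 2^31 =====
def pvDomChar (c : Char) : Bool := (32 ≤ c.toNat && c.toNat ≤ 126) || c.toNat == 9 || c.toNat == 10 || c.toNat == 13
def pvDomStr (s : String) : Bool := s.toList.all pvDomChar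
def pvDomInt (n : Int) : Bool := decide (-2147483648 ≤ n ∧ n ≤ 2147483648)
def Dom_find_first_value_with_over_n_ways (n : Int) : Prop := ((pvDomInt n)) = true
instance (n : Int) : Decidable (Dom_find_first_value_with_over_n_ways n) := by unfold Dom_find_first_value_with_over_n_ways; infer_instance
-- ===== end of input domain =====

-- B replaces A's bottom-up in-place coin-change DP over the primes by a top-down memoized
-- recursion count(t, j) on (target, prime-prefix length); same sieve and doubling outer loop
-- (objective: alternative decomposition, not claimed faster).
-- Both ports model the unbounded `while True:` doubling loop with the same fuel (64 doublings,
-- default 0 on exhaustion) — a totality guard only; the equivalence proof never uses it.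
-- `int(limit**0.5)` is ported as Nat.sqrt (checked equal to Python's float expression for every
-- reachable limit 10*2^k, k < 64).

-- ===== PORT A =====
-- inner sieve loop: for j in range(i*i, n+1, i): sieve[j] = False   (i = 0 guard is for totality only; i ≥ 2 at every call)
def pvSieveInner (nn i : Nat) (j : Nat) (s : List Bool) : List Bool :=
  if i = 0 then s
  else if h : j ≤ nn then pvSieveInner nn i (j + i) (s.set j false) else s
termination_by nn + 1 - j
decreasing_by omega

def prime_numbers_up_to (nn : Nat) : List Nat :=
  let sieve := ((List.replicate (nn + 1) true).set 0 false).set 1 false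
  -- for i in range(2, int(n**0.5) + 1)
  let sieve := (List.range' 2 (Nat.sqrt nn + 1 - 2)).foldl
    (fun s i => if s.getD i false then pvSieveInner nn i (i * i) s else s) sieve
  -- [x for x in range(2, n + 1) if sieve[x]]
  (List.range' 2 (nn + 1 - 2)).filter (fun x => sieve.getD x false)

-- for i in range(prime, limit + 1): ways[i] += ways[i - prime]
def pvDPInner (limit p : Nat) (i : Nat) (w : List Int) : List Int :=
  if h : i ≤ limit then pvDPInner limit p (i + 1) (w.set i (w.getD i 0 + w.getD (i - p) 0)) else w
termination_by limit + 1 - i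
decreasing_by omega

def count_prime_sum_ways (limit : Nat) : List Int :=
  let primes := prime_numbers_up_to limit
  let ways := (List.replicate (limit + 1) (0 : Int)).set 0 1
  primes.foldl (fun w p => pvDPInner limit p p w) ways

-- for i in range(limit): if ways[i] > n: return i
def pvScanA (ways : List Int) (n : Int) (limit : Nat) (i : Nat) : Option Nat :=
  if h : i < limit then
    if ways.getD i 0 > n then some i else pvScanA ways n limit (i + 1)
  else none
termination_by limit - i
decreasing_by omega

def pvLoopA (n : Int) : Nat → Nat → Int
  | 0, _ => 0
  | fuel + 1, limit =>
    let ways := count_prime_sum_ways limit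
    match pvScanA ways n limit 0 with
    | some i => (i : Int)
    | none => pvLoopA n fuel (limit * 2)

def find_first_value_with_over_n_ways (n : Int) : Int := pvLoopA n 64 10

-- ===== PORT B =====
-- memoized count(t, j) from Source B; memo[j][t] is a list-of-rows table, fuel is a totality
-- guard only (Python's recursion is bounded by j + t); the `t - p < 0` test inlines the
-- recursion's own `t < 0` base case at the call site so that the fuel-free measure decreases.
def pvCountB (primes : List Nat) : Nat → Int → Nat → List (List (Option Int)) →
    Int × List (List (Option Int))
  | 0, _, _, memo => (0, memo)
  | fuel + 1, t, j, memo =>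
    if t < 0 then (0, memo)
    else
      match j with
      | 0 => ((if t = 0 then 1 else 0), memo)
      | j' + 1 =>
        match (memo.getD (j' + 1) []).getD t.toNat none with
        | some c => (c, memo)
        | none =>
          let p := primes.getD j' 0
          let r1 := pvCountB primes fuel t j' memo
          let r2 := if t - (p : Int) < 0 then ((0 : Int), r1.2)
                    else pvCountB primes fuel (t - (p : Int)) (j' + 1) r1.2
          let c := r1.1 + r2.1
          (c, r2.2.set (j' + 1) ((r2.2.getD (j' + 1) []).set t.toNat (some c)))

-- for i in range(limit): if count(i, m) > n: return i   (threading the memo table)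
def pvScanB (primes : List Nat) (m : Nat) (n : Int) (limit : Nat) (i : Nat)
    (memo : List (List (Option Int))) : Option Nat :=
  if h : i < limit then
    let r := pvCountB primes (m + limit + 1) (i : Int) m memo
    if r.1 > n then some i else pvScanB primes m n limit (i + 1) r.2
  else none
termination_by limit - i
decreasing_by omega

def pvLoopB (n : Int) : Nat → Nat → Int
  | 0, _ => 0
  | fuel + 1, limit =>
    let primes := prime_numbers_up_to limit
    let m := primes.length
    let memo := List.replicate (m + 1) (List.replicate (limit + 1) (none : Option Int))
    match pvScanB primes m n limit 0 memo with
    | some i => (i : Int)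
    | none => pvLoopB n fuel (limit * 2)

def find_first_value_with_over_n_ways_alt (n : Int) : Int := pvLoopB n 64 10

-- ===== PRECONDITION & SPEC =====
def Spec_find_first_value_with_over_n_ways (n : Int) (out : Int) : Prop := out = find_first_value_with_over_n_ways_alt n
instance (n : Int) (out : Int) : Decidable (Spec_find_first_value_with_over_n_ways n out) := by unfold Spec_find_first_value_with_over_n_ways; infer_instance

-- ===== CLAIM (what is proved, stated in full; the proofs are below) =====
def Claim_equal_find_first_value_with_over_n_ways : Prop := ∀ (n : Int), Dom_find_first_value_with_over_n_ways n → Spec_find_first_value_with_over_n_ways n (find_first_value_with_over_n_ways n)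

-- ===== LEMMAS AND PROOFS =====

-- the common pure value: pvPure ps t = number of multisets over the list ps summing to t,
-- built row by row, one pvRow pass per element of ps.
def pvRow (prev : Nat → Int) (p : Nat) (t : Nat) : Int :=
  if p = 0 then prev t
  else if h : t < p then prev t
  else prev t + pvRow prev p (t - p)
termination_by t
decreasing_by omega

theorem pvDPInner_length (limit p : Nat) : ∀ i w, (pvDPInner limit p i w).length = w.length := by
  intro i w
  induction i, w using pvDPInner.induct limit p with
  | case1 i w h ih => rw [pvDPInner, dif_pos h]; simpa using ih
  | case2 i w h => rw [pvDPInner, dif_neg h]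

theorem pvDPInner_lt (limit p : Nat) : ∀ i w k, k < i → (pvDPInner limit p i w).getD k 0 = w.getD k 0 := by
  intro i w
  induction i, w using pvDPInner.induct limit p with
  | case1 i w h ih =>
    intro k hk
    rw [pvDPInner, dif_pos h]
    rw [ih k (by omega)]
    simp [List.getD_eq_getElem?_getD, List.getElem?_set_ne (by omega : i ≠ k)]
  | case2 i w h => intro k hk; rw [pvDPInner, dif_neg h]

theorem pvDPInner_rec (limit p : Nat) : ∀ i w k, i ≤ k → k ≤ limit → p ≤ k → 1 ≤ p →
    k < w.length →
    (pvDPInner limit p i w).getD k 0 = w.getD k 0 + (pvDPInner limit p i w).getD (k - p) 0 := by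
  intro i w
  induction i, w using pvDPInner.induct limit p with
  | case1 i w h ih =>
    intro k hik hkl hpk hp hkw
    by_cases hk : k = i
    · subst hk
      rw [pvDPInner, dif_pos h]
      rw [pvDPInner_lt limit p (k+1) _ k (by omega),
          pvDPInner_lt limit p (k+1) _ (k-p) (by omega)]
      simp [List.getD_eq_getElem?_getD, List.getElem?_set_self (by omega : k < w.length),
        List.getElem?_set_ne (by omega : k ≠ k - p)]
    · rw [pvDPInner, dif_pos h]
      rw [ih k (by omega) hkl hpk hp (by simpa using hkw)]
      simp [List.getD_eq_getElem?_getD, List.getElem?_set_ne (by omega : i ≠ k)]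
  | case2 i w h => intro k hik hkl; omega

theorem pvDPInner_closed (limit p : Nat) (hp : 1 ≤ p) (w : List Int) (f : Nat → Int)
    (hw : w.length = limit + 1) (hf : ∀ k, k ≤ limit → w.getD k 0 = f k) :
    ∀ k, k ≤ limit → (pvDPInner limit p p w).getD k 0 = pvRow f p k := by
  intro k
  induction k using Nat.strong_induction_on with
  | _ k ih =>
    intro hk
    by_cases hkp : k < p
    · rw [pvDPInner_lt limit p p w k hkp, pvRow, if_neg (by omega), dif_pos hkp, hf k hk]
    · rw [pvDPInner_rec limit p p w k (by omega) hk (by omega) hp (by omega),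
          ih (k - p) (by omega) (by omega), hf k hk]
      conv_rhs => rw [pvRow]
      rw [if_neg (by omega), dif_neg hkp]
def pvPure (ps : List Nat) : Nat → Int :=
  ps.foldl pvRow (fun t => if t = 0 then 1 else 0)

theorem pvFoldDP (limit : Nat) : ∀ (ps : List Nat) (w : List Int) (f : Nat → Int),
    w.length = limit + 1 → (∀ k, k ≤ limit → w.getD k 0 = f k) → (∀ p ∈ ps, 1 ≤ p) →
    ∀ k, k ≤ limit →
      (ps.foldl (fun w p => pvDPInner limit p p w) w).getD k 0 = ps.foldl pvRow f k := by
  intro ps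
  induction ps with
  | nil => intro w f hw hf _ k hk; simpa using hf k hk
  | cons p ps ih =>
    intro w f hw hf hpos k hk
    simp only [List.foldl_cons]
    exact ih (pvDPInner limit p p w) (pvRow f p)
      (by rw [pvDPInner_length]; exact hw)
      (fun k hk => pvDPInner_closed limit p (hpos p (by simp)) w f hw hf k hk)
      (fun q hq => hpos q (by simp [hq])) k hk

theorem pvPrimes_pos (limit : Nat) : ∀ p ∈ prime_numbers_up_to limit, 1 ≤ p := by
  intro p hp
  unfold prime_numbers_up_to at hp
  have := List.of_mem_filter hp
  have hm := List.mem_of_mem_filter hp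
  have := List.mem_range'_1.mp hm
  omega

theorem pvWaysA (limit : Nat) (k : Nat) (hk : k ≤ limit) :
    (count_prime_sum_ways limit).getD k 0 = pvPure (prime_numbers_up_to limit) k := by
  unfold count_prime_sum_ways pvPure
  apply pvFoldDP limit _ _ _ (by simp) _ (pvPrimes_pos limit) k hk
  intro k hk
  rcases Nat.eq_zero_or_pos k with h | h
  · subst h; simp [List.getD_eq_getElem?_getD]
  · simp [List.getD_eq_getElem?_getD, List.getElem?_set_ne (by omega : 0 ≠ k), if_neg (by omega : ¬ k = 0)]
def pvInv (ps : List Nat) (limit : Nat) (memo : List (List (Option Int))) : Prop :=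
  memo.length = ps.length + 1 ∧
  (∀ j, j ≤ ps.length → (memo.getD j []).length = limit + 1) ∧
  (∀ j t v, j ≤ ps.length → t ≤ limit →
    (memo.getD j []).getD t none = some v → v = pvPure (ps.take j) t)

def pvFuelOK (fuel : Nat) (t : Int) (j : Nat) : Prop :=
  if t < 0 then 1 ≤ fuel else j + t.toNat + 1 ≤ fuel

theorem pvPure_take_succ (ps : List Nat) (j : Nat) (hj : j < ps.length) (t : Nat) :
    pvPure (ps.take (j + 1)) t = pvRow (pvPure (ps.take j)) (ps.getD j 0) t := by
  have h1 : ps.take (j + 1) = ps.take j ++ [ps.getD j 0] := by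
    rw [List.take_succ]
    congr 1
    simp [List.getElem?_eq_getElem hj, List.getD_eq_getElem?_getD, Option.toList]
  rw [h1]
  unfold pvPure
  rw [List.foldl_append]
  simp

theorem pvInv_set (ps : List Nat) (limit : Nat) (memo : List (List (Option Int)))
    (hin : pvInv ps limit memo) (j t : Nat) (hj : j ≤ ps.length) (ht : t ≤ limit) (c : Int)
    (hc : c = pvPure (ps.take j) t) :
    pvInv ps limit (memo.set j ((memo.getD j []).set t (some c))) := by
  obtain ⟨h1, h2, h3⟩ := hin
  refine ⟨by simpa using h1, ?_, ?_⟩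
  · intro j2 hj2
    by_cases hjj : j = j2
    · subst hjj
      simp [List.getD_eq_getElem?_getD, List.getElem?_set_self (by omega : j < memo.length)]
      simpa using h2 j hj
    · simp [List.getD_eq_getElem?_getD, List.getElem?_set_ne hjj]
      simpa [List.getD_eq_getElem?_getD] using h2 j2 hj2
  · intro j2 t2 v hj2 ht2
    by_cases hjj : j = j2
    · subst hjj
      simp only [List.getD_eq_getElem?_getD, List.getElem?_set_self (by omega : j < memo.length)]
      by_cases htt : t = t2
      · subst htt
        have hlen : t < (memo.getD j []).length := by rw [h2 j hj]; omega
        simp only [Option.getD_some, List.getElem?_set_self (by simpa [List.getD_eq_getElem?_getD] using hlen)]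
        intro hv; rw [← hc]; injection hv with hv; omega
      · simp only [Option.getD_some, List.getElem?_set_ne htt]
        intro hv
        exact h3 j t2 v hj ht2 (by simpa [List.getD_eq_getElem?_getD] using hv)
    · simp only [List.getD_eq_getElem?_getD, List.getElem?_set_ne hjj]
      intro hv
      exact h3 j2 t2 v hj2 ht2 (by simpa [List.getD_eq_getElem?_getD] using hv)
theorem pvCountB_succ (ps : List Nat) (fuel : Nat) (t : Int) (j : Nat)
    (memo : List (List (Option Int))) :
    pvCountB ps (fuel + 1) t j memo =
      if t < 0 then (0, memo)
      else
        match j with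
        | 0 => ((if t = 0 then 1 else 0), memo)
        | j' + 1 =>
          match (memo.getD (j' + 1) []).getD t.toNat none with
          | some c => (c, memo)
          | none =>
            let p := ps.getD j' 0
            let r1 := pvCountB ps fuel t j' memo
            let r2 := if t - (p : Int) < 0 then ((0 : Int), r1.2)
                      else pvCountB ps fuel (t - (p : Int)) (j' + 1) r1.2
            let c := r1.1 + r2.1
            (c, r2.2.set (j' + 1) ((r2.2.getD (j' + 1) []).set t.toNat (some c))) := rfl

theorem pvCountB_spec (ps : List Nat) (limit : Nat) (hps : ∀ p ∈ ps, 1 ≤ p) :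
    ∀ fuel t j memo, j ≤ ps.length → t ≤ (limit : Int) → pvFuelOK fuel t j → pvInv ps limit memo →
      (pvCountB ps fuel t j memo).1 = (if t < 0 then 0 else pvPure (ps.take j) t.toNat) ∧
      pvInv ps limit (pvCountB ps fuel t j memo).2 := by
  intro fuel
  induction fuel with
  | zero =>
    intro t j memo hj ht hfu hin
    unfold pvFuelOK at hfu; split at hfu <;> omega
  | succ fuel ih =>
    intro t j memo hj ht hfu hin
    by_cases h0 : t < 0
    · rw [pvCountB_succ, if_pos h0]; simp [h0, hin]
    · rw [pvCountB_succ, if_neg h0]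
      match j with
      | 0 =>
        dsimp only
        refine ⟨?_, hin⟩
        simp only [if_neg h0, pvPure, List.take_zero, List.foldl_nil]
        by_cases ht0 : t = 0
        · simp [ht0]
        · rw [if_neg ht0, if_neg (by omega)]
      | j' + 1 =>
        have hj' : j' < ps.length := by omega
        have htn : t.toNat ≤ limit := by omega
        cases hm : (memo.getD (j' + 1) []).getD t.toNat none with
        | some c =>
          dsimp only; rw [hm]
          refine ⟨?_, hin⟩
          simp only [if_neg h0]
          exact hin.2.2 (j' + 1) t.toNat c hj htn hm
        | none =>
          dsimp only; rw [hm]; dsimp only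
          have hpmem : ps.getD j' 0 ∈ ps := by
            rw [List.getD_eq_getElem?_getD, List.getElem?_eq_getElem hj']
            exact List.getElem_mem hj'
          have hp1 : 1 ≤ ps.getD j' 0 := hps _ hpmem
          set p : Nat := ps.getD j' 0 with hpdef
          -- first recursive call
          have hfu1 : pvFuelOK fuel t j' := by
            unfold pvFuelOK at hfu ⊢; rw [if_neg h0] at hfu ⊢; omega
          obtain ⟨hr1v, hr1i⟩ := ih t j' memo (by omega) ht hfu1 hin
          -- second recursive call (or inlined t - p < 0 base case)
          have hfu2 : pvFuelOK fuel (t - (p : Int)) (j' + 1) := by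
            unfold pvFuelOK at hfu ⊢; rw [if_neg h0] at hfu
            split <;> omega
          have hstep : ∀ (tt : Nat), tt ≤ limit →
              pvPure (ps.take (j' + 1)) tt = pvRow (pvPure (ps.take j')) p tt :=
            fun tt _ => pvPure_take_succ ps j' hj' tt
          by_cases hneg : t - (p : Int) < 0
          · rw [if_pos hneg]
            have hc : (pvCountB ps fuel t j' memo).1 + 0 = pvPure (ps.take (j' + 1)) t.toNat := by
              rw [hr1v, if_neg h0, hstep t.toNat htn, pvRow,
                if_neg (by omega), dif_pos (by omega), add_zero]
            constructor
            · simp only [if_neg h0]; simpa using hc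
            · exact pvInv_set ps limit _ hr1i (j' + 1) t.toNat hj htn _ (by simpa using hc)
          · rw [if_neg hneg]
            obtain ⟨hr2v, hr2i⟩ := ih (t - (p : Int)) (j' + 1) (pvCountB ps fuel t j' memo).2
              (by omega) (by omega) hfu2 hr1i
            have hc : (pvCountB ps fuel t j' memo).1 +
                (pvCountB ps fuel (t - (p : Int)) (j' + 1) (pvCountB ps fuel t j' memo).2).1
                = pvPure (ps.take (j' + 1)) t.toNat := by
              rw [hr1v, hr2v, if_neg h0, if_neg hneg,
                hstep t.toNat htn, pvRow, if_neg (by omega), dif_neg (by omega),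
                hstep (t - (p : Int)).toNat (by omega),
                show (t - (p : Int)).toNat = t.toNat - p from by omega]
            constructor
            · simp only [if_neg h0]; exact hc
            · exact pvInv_set ps limit _ hr2i (j' + 1) t.toNat hj htn _ hc
theorem pvInv_init (ps : List Nat) (limit : Nat) :
    pvInv ps limit (List.replicate (ps.length + 1) (List.replicate (limit + 1) (none : Option Int))) := by
  refine ⟨by simp, ?_, ?_⟩
  · intro j hj
    simp [List.getD_eq_getElem?_getD, Nat.lt_succ_of_le hj]
  · intro j t v hj ht
    simp [List.getD_eq_getElem?_getD, Nat.lt_succ_of_le hj,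
      (by omega : t < limit + 1)]

theorem pvScan_eq (limit : Nat) (n : Int) : ∀ k i memo, limit - i = k →
    pvInv (prime_numbers_up_to limit) limit memo →
    pvScanB (prime_numbers_up_to limit) (prime_numbers_up_to limit).length n limit i memo
      = pvScanA (count_prime_sum_ways limit) n limit i := by
  intro k
  induction k with
  | zero =>
    intro i memo hk _
    rw [pvScanB, dif_neg (by omega), pvScanA, dif_neg (by omega)]
  | succ k ih =>
    intro i memo hk hin
    have hi : i < limit := by omega
    rw [pvScanB, dif_pos hi, pvScanA, dif_pos hi]
    dsimp only
    obtain ⟨hv, hinv⟩ := pvCountB_spec (prime_numbers_up_to limit) limit (pvPrimes_pos limit)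
      ((prime_numbers_up_to limit).length + limit + 1) (i : Int)
      (prime_numbers_up_to limit).length memo (le_refl _) (by omega)
      (by unfold pvFuelOK; rw [if_neg (by omega)]; omega) hin
    rw [hv, if_neg (show ¬((i : Int) < 0) by omega)]
    simp only [Int.toNat_natCast, List.take_length]
    rw [pvWaysA limit i (by omega)]
    by_cases hgt : pvPure (prime_numbers_up_to limit) i > n
    · rw [if_pos hgt, if_pos hgt]
    · rw [if_neg hgt, if_neg hgt]
      exact ih (i + 1) _ (by omega) hinv

theorem pvLoop_eq (n : Int) : ∀ fuel limit, pvLoopA n fuel limit = pvLoopB n fuel limit := by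
  intro fuel
  induction fuel with
  | zero => intro limit; rfl
  | succ fuel ih =>
    intro limit
    rw [pvLoopA, pvLoopB]
    rw [pvScan_eq limit n (limit - 0) 0 _ rfl (pvInv_init (prime_numbers_up_to limit) limit)]
    cases pvScanA (count_prime_sum_ways limit) n limit 0 with
    | some i => rfl
    | none => exact ih (limit * 2)

-- ===== VERDICT (by name: the statement is the Claim_ definition above) =====
theorem find_first_value_with_over_n_ways_spec : Claim_equal_find_first_value_with_over_n_ways := by
  intro n _
  unfold Spec_find_first_value_with_over_n_ways find_first_value_with_over_n_ways
    find_first_value_with_over_n_ways_alt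
  exact pvLoop_eq n 64 10
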